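-- pv_equiv track=rewrite | github.com/RomelGonza/JudgesAPP | src/utils.py | obtener_campo_firebase
-- ===== SOURCE A (Python) =====
-- def obtener_campo_firebase(jurado_num, categoria):
--     """
--     Obtiene el nombre del campo en Firebase según el número de jurado y la categoría.
--     Para los jurados 1-9, el número se incluye en el nombre del campo.
--     Para los jurados 10-13, el nombre del campo es fijo.
--     """
--     # Mapeo de rangos de jurados a sus sufijos de campo
--     campos_por_jurado = {
--         (1, 2, 3): "e_calificacion_jurado{}_pv",  # Presentación y Vestimenta
--         (4, 5, 6): "e_calificacion_jurado{}_m",   # Música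
--         (7, 8, 9): "e_calificacion_jurado{}_c",   # Coreografía
--         (10,): "v_calificacion_jurado_mc",      # Música (danzarines y músicos)
--         (11,): "v_calificacion_jurado_v",       # Vestimenta
--         (12,): "v_calificacion_jurado_pdl",     # Recorrido
--         (13,): "v_calificacion_jurado_ci"       # Brigada Ecológica
--     }
--
--     # Encontrar el campo correspondiente al número de jurado
--     for jurados, campo_template in campos_por_jurado.items():
--         if jurado_num in jurados:
--             # Si es uno de los primeros 9 jurados, incluir el número en el nombre del campo
--             if jurado_num <= 9:
--                 return campo_template.format(jurado_num)
--             # Para los jurados 10-13, usar el nombre fijo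
--             return campo_template
--
--     raise ValueError(f"No se encontró campo para el jurado {jurado_num}")
-- ===== SOURCE B (Python) =====
-- def obtener_campo_firebase(jurado_num, categoria):
--     if jurado_num in (1, 2, 3, 4, 5, 6, 7, 8, 9):
--         suffix = ("pv", "m", "c")[(jurado_num - 1) // 3]
--         return f"e_calificacion_jurado{jurado_num}_{suffix}"
--     fijos = {
--         10: "v_calificacion_jurado_mc",
--         11: "v_calificacion_jurado_v",
--         12: "v_calificacion_jurado_pdl",
--         13: "v_calificacion_jurado_ci",
--     }
--     if jurado_num in fijos:
--         return fijos[jurado_num]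
--     raise ValueError(f"No se encontró campo para el jurado {jurado_num}")
-- ===== Notes on version B (the rewrite author's own statement) =====
-- stated objective: simpler
-- what changed: Replaced the loop over a tuple-keyed dict with direct arithmetic: for 1-9 the suffix is picked by (n-1)//3 from a 3-element tuple and the field is built with an f-string, for 10-13 a plain int-keyed dict lookup; same ValueError otherwise.
import Mathlib
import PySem

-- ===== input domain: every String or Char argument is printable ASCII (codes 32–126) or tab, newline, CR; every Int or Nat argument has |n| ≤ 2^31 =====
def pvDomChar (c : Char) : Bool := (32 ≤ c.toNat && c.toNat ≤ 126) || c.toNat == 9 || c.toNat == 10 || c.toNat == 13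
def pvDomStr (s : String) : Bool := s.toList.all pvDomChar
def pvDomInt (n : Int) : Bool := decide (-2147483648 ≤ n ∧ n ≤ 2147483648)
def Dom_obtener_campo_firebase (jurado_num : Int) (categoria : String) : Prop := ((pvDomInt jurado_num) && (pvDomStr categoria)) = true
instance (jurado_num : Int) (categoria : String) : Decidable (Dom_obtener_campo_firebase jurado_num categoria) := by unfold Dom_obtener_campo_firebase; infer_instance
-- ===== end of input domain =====

-- B drops A's loop over a tuple-keyed dict: for 1-9 the suffix is picked arithmetically by (n-1)//3,
-- for 10-13 a plain int-keyed dict lookup; same ValueError otherwise (objective: simpler).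

-- ===== PORT A =====
-- A's dict with tuple keys, in insertion order (tuples of jurado numbers → field template).
def pvCamposPorJurado : List (List Int × String) :=
  [([1, 2, 3], "e_calificacion_jurado{}_pv"),
   ([4, 5, 6], "e_calificacion_jurado{}_m"),
   ([7, 8, 9], "e_calificacion_jurado{}_c"),
   ([10], "v_calificacion_jurado_mc"),
   ([11], "v_calificacion_jurado_v"),
   ([12], "v_calificacion_jurado_pdl"),
   ([13], "v_calificacion_jurado_ci")]

-- campo_template.format(jurado_num): substitute "{}" with str(jurado_num)
def pvFormat (t : String) (n : Int) : String := PySem.Str.replace t "{}" (PySem.Int.toStr n)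

-- the for-loop over the dict items; "" stands for the final `raise ValueError` (excluded by Pre_)
def pvObtLoop (jurado_num : Int) : List (List Int × String) → String
  | [] => ""
  | (jurados, campo_template) :: rest =>
      if jurados.contains jurado_num then
        if jurado_num ≤ 9 then pvFormat campo_template jurado_num
        else campo_template
      else pvObtLoop jurado_num rest

def obtener_campo_firebase (jurado_num : Int) (categoria : String) : String :=
  pvObtLoop jurado_num pvCamposPorJurado

-- ===== PORT B =====
-- fixed int-keyed dict for jurados 10-13
def pvFijos : PySem.Dict Int String :=
  PySem.Dict.ofList
  [(10, "v_calificacion_jurado_mc"), (11, "v_calificacion_jurado_v"),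
   (12, "v_calificacion_jurado_pdl"), (13, "v_calificacion_jurado_ci")]

def obtener_campo_firebase_alt (jurado_num : Int) (categoria : String) : String :=
  if [1, 2, 3, 4, 5, 6, 7, 8, 9].contains jurado_num then
    let suffix := (PySem.List.pyGet? ["pv", "m", "c"] (PySem.Int.floordiv (jurado_num - 1) 3)).getD ""
    "e_calificacion_jurado" ++ PySem.Int.toStr jurado_num ++ "_" ++ suffix
  else
    -- "" stands for the final `raise ValueError` (excluded by Pre_)
    (PySem.Dict.get? pvFijos jurado_num).getD ""

-- ===== PRECONDITION & SPEC =====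
-- Pre_ excludes exactly the inputs on which A raises ValueError (jurado_num outside 1..13).
def Pre_obtener_campo_firebase (jurado_num : Int) (categoria : String) : Prop :=
  1 ≤ jurado_num ∧ jurado_num ≤ 13
instance (jurado_num : Int) (categoria : String) : Decidable (Pre_obtener_campo_firebase jurado_num categoria) := by
  unfold Pre_obtener_campo_firebase; infer_instance

def pvWitness_obtener_campo_firebase : Int × String := (5, "danza")

def Spec_obtener_campo_firebase (jurado_num : Int) (categoria : String) (out : String) : Prop := out = obtener_campo_firebase_alt jurado_num categoria
instance (jurado_num : Int) (categoria : String) (out : String) : Decidable (Spec_obtener_campo_firebase jurado_num categoria out) := by unfold Spec_obtener_campo_firebase; infer_instance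

-- ===== CLAIM (what is proved, stated in full; the proofs are below) =====
def Claim_equal_obtener_campo_firebase : Prop := ∀ (jurado_num : Int) (categoria : String), Dom_obtener_campo_firebase jurado_num categoria → Pre_obtener_campo_firebase jurado_num categoria → Spec_obtener_campo_firebase jurado_num categoria (obtener_campo_firebase jurado_num categoria)

-- ===== LEMMAS AND PROOFS =====
lemma pv_eq_on_pre (n : Int) (h1 : 1 ≤ n) (h2 : n ≤ 13) (c : String) :
    obtener_campo_firebase n c = obtener_campo_firebase_alt n c := by
  rw [show obtener_campo_firebase n c = obtener_campo_firebase n "" from rfl,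
      show obtener_campo_firebase_alt n c = obtener_campo_firebase_alt n "" from rfl]
  interval_cases n <;> decide

-- ===== VERDICT (by name: the statement is the Claim_ definition above) =====
theorem obtener_campo_firebase_spec : Claim_equal_obtener_campo_firebase := by
  intro n c _ hpre
  exact pv_eq_on_pre n hpre.1 hpre.2 c
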